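-- pv_equiv track=rewrite | github.com/aditya697/Timetable_Generator | Algorithm/TeacherAllocation.py | assign_teachers_to_branch_courses
-- ===== SOURCE A (Python) =====
-- def assign_teachers_to_branch_courses(branch_course, allocated_teachers):
--     Branch_Course_Teachers = {}
--     for branch, courses in branch_course.items():
--         Branch_Course_Teachers[branch] = []
--         for course in courses:
--             combined_course = {course: set()}
--             for key, values in allocated_teachers.items():
--                 if branch in key:
--                     for value in values:
--                         if isinstance(value, dict):
--                             if course in value:
--                                 combined_course[course].add(list(value.values())[0])
--             if combined_course[course]:
--                 Branch_Course_Teachers[branch].append(combined_course)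
--     return Branch_Course_Teachers
-- ===== SOURCE B (Python) =====
-- def assign_teachers_to_branch_courses(branch_course, allocated_teachers):
--     branches = list(branch_course)
--     acc = {}
--     for key, values in allocated_teachers.items():
--         for value in values:
--             if not value:
--                 continue
--             teacher = next(iter(value.values()))
--             for branch in branches:
--                 if branch in key:
--                     for course in value:
--                         acc.setdefault((branch, course), set()).add(teacher)
--     result = {}
--     for branch, courses in branch_course.items():
--         row = []
--         for course in courses:
--             teachers = acc.get((branch, course))
--             if teachers:
--                 row.append({course: teachers})
--         result[branch] = row
--     return result
-- ===== Notes on version B (the rewrite author's own statement) =====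
-- stated objective: faster
-- what changed: A rescans all of allocated_teachers once per (branch, course) pair; B inverts the loops: one pass over allocated_teachers builds a (branch, course) -> teacher-set table, then a separate assembly pass over branch_course emits the rows by table lookup.
import Mathlib
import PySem

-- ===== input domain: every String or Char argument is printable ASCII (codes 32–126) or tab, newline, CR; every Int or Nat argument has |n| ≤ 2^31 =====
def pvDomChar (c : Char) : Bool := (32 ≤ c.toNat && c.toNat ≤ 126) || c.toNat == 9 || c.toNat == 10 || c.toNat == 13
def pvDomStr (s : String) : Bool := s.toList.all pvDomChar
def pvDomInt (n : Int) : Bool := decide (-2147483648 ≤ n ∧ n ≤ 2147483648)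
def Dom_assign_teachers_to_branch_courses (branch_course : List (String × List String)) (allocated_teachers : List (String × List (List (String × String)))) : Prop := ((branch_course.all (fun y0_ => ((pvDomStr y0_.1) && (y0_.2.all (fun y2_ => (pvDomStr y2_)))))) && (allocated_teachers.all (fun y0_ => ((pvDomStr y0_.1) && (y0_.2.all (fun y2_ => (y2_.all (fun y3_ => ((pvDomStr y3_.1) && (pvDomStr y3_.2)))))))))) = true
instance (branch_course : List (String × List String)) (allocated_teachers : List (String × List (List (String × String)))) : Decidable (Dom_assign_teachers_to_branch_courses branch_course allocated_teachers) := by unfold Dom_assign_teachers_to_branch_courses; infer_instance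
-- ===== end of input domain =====

-- B replaces A's per-(branch,course) rescans of allocated_teachers by ONE pass over allocated_teachers
-- that builds a (branch, course) -> teacher-set table, plus a separate assembly pass (objective: faster).
-- dict-typed arguments are normalised with PySem.Dict.ofList, exactly as the Python dicts the functions receive.

-- ===== PORT A =====
def assign_teachers_to_branch_courses (branch_course : List (String × List String)) (allocated_teachers : List (String × List (List (String × String)))) : List (String × List (List (String × List String))) :=
  let bcd := PySem.Dict.ofList branch_course
  let atd := PySem.Dict.ofList allocated_teachers
  (bcd.items.foldl (fun res p =>
      -- Branch_Course_Teachers[branch] = []  followed by appends: net effect is one insert of the final row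
      res.insert p.1 (p.2.foldl (fun row course =>
        -- combined_course = {course: set()}; the set is mutated in place, the dict appended at the end
        let s : PySem.Set String := atd.items.foldl (fun s q =>
            if PySem.Str.isIn p.1 q.1 then
              -- for value in values: (isinstance(value, dict) is always true at this type)
              q.2.foldl (fun s v =>
                 let vd := PySem.Dict.ofList v
                 if vd.contains course then PySem.Set.add s (vd.values.headD "") else s) s
            else s) PySem.Set.empty
        if s ≠ [] then row ++ [[(course, s)]] else row) [])) PySem.Dict.empty).items

-- ===== PORT B =====
def assign_teachers_to_branch_courses_alt (branch_course : List (String × List String)) (allocated_teachers : List (String × List (List (String × String)))) : List (String × List (List (String × List String))) :=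
  let bcd := PySem.Dict.ofList branch_course
  let atd := PySem.Dict.ofList allocated_teachers
  let branches := bcd.keys
  -- single pass over allocated_teachers: build the (branch, course) -> teacher-set table
  let acc : PySem.Dict (String × String) (PySem.Set String) :=
    atd.items.foldl (fun acc q =>
      q.2.foldl (fun acc v =>
        let vd := PySem.Dict.ofList v
        if vd.items = [] then acc else
        let teacher := vd.values.headD ""
        branches.foldl (fun acc branch =>
          if PySem.Str.isIn branch q.1 then
            vd.keys.foldl (fun acc course =>
              PySem.Dict.modify acc (branch, course) PySem.Set.empty (fun s => PySem.Set.add s teacher)) acc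
          else acc) acc) acc) PySem.Dict.empty
  -- assembly pass over branch_course
  (bcd.items.foldl (fun res p =>
      res.insert p.1 (p.2.foldl (fun row course =>
        let teachers := acc.getD (p.1, course) []
        if teachers ≠ [] then row ++ [[(course, teachers)]] else row) [])) PySem.Dict.empty).items

-- ===== PRECONDITION & SPEC =====
def Spec_assign_teachers_to_branch_courses (branch_course : List (String × List String)) (allocated_teachers : List (String × List (List (String × String)))) (out : List (String × List (List (String × List String)))) : Prop := out = assign_teachers_to_branch_courses_alt branch_course allocated_teachers
instance (branch_course : List (String × List String)) (allocated_teachers : List (String × List (List (String × String)))) (out : List (String × List (List (String × List String)))) : Decidable (Spec_assign_teachers_to_branch_courses branch_course allocated_teachers out) := by unfold Spec_assign_teachers_to_branch_courses; infer_instance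

-- ===== CLAIM (what is proved, stated in full; the proofs are below) =====
def Claim_equal_assign_teachers_to_branch_courses : Prop := ∀ (branch_course : List (String × List String)) (allocated_teachers : List (String × List (List (String × String)))), Dom_assign_teachers_to_branch_courses branch_course allocated_teachers → Spec_assign_teachers_to_branch_courses branch_course allocated_teachers (assign_teachers_to_branch_courses branch_course allocated_teachers)


-- ===== LEMMAS AND PROOFS =====

-- set.add is idempotent
theorem pv_add_add_self {s : PySem.Set String} {t : String} :
    PySem.Set.add (PySem.Set.add s t) t = PySem.Set.add s t := by
  simp [PySem.Set.add, PySem.Set.contains]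
  split_ifs with h
  · simp [h]
  · simp

-- projection of the keys-loop of B at (b, c)
theorem pv_keys_fold (b c β t : String) (ks : List String)
    (acc : PySem.Dict (String × String) (PySem.Set String)) :
    (ks.foldl (fun acc course =>
        PySem.Dict.modify acc (β, course) PySem.Set.empty (fun s => PySem.Set.add s t)) acc).getD (b, c) []
      = if β = b ∧ c ∈ ks then PySem.Set.add (acc.getD (b, c) []) t else acc.getD (b, c) [] := by
  induction ks generalizing acc with
  | nil => simp
  | cons k rest ih =>
    have hstep : (PySem.Dict.modify acc (β, k) PySem.Set.empty (fun s => PySem.Set.add s t)).getD (b, c) []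
        = if β = b ∧ c = k then PySem.Set.add (acc.getD (b, c) []) t else acc.getD (b, c) [] := by
      by_cases h : β = b ∧ c = k
      · obtain ⟨h1, h2⟩ := h
        subst h1; subst h2
        simp [PySem.Dict.getD_modify_self (d := acc) (k := (β, c))
            (d0 := ([] : PySem.Set String)) (f := fun s => PySem.Set.add s t)]
      · have hne : (b, c) ≠ (β, k) := by
          intro he
          exact h ⟨(Prod.mk.injEq .. ▸ he).1.symm, (Prod.mk.injEq .. ▸ he).2⟩
        simpa [h, PySem.Set.empty] using
          PySem.Dict.getD_modify_of_ne (d := acc) (k := (β, k)) (k' := (b, c))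
            (d0 := ([] : PySem.Set String)) (f := fun s => PySem.Set.add s t) hne
    simp only [List.foldl_cons, ih, hstep]
    by_cases hβ : β = b
    · by_cases hk : c = k
      · subst hk
        by_cases hr : c ∈ rest <;> simp [hβ, hr]
      · by_cases hr : c ∈ rest <;> simp [hβ, hk, hr]
    · simp [hβ]

-- the branches-loop does not touch (b, c) when b is absent from the branch list
theorem pv_branches_fold_notmem (b c key t : String) (ks : List String) (branches : List String)
    (hb : b ∉ branches)
    (acc : PySem.Dict (String × String) (PySem.Set String)) :
    (branches.foldl (fun acc branch =>
        if PySem.Str.isIn branch key then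
          ks.foldl (fun acc course =>
            PySem.Dict.modify acc (branch, course) PySem.Set.empty (fun s => PySem.Set.add s t)) acc
        else acc) acc).getD (b, c) [] = acc.getD (b, c) [] := by
  induction branches generalizing acc with
  | nil => rfl
  | cons γ rs ih2 =>
    have hγ : γ ≠ b := fun h => hb (h ▸ List.mem_cons_self ..)
    simp only [List.foldl_cons]
    rw [ih2 (fun h => hb (List.mem_cons_of_mem _ h))]
    by_cases hin : PySem.Str.isIn γ key = true
    · have hcond : ¬(γ = b ∧ c ∈ ks) := fun h => hγ h.1
      rw [if_pos hin, pv_keys_fold, if_neg hcond]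
    · rw [if_neg hin]

-- projection of the branches-loop of B at (b, c), for one allocated value v
theorem pv_branches_fold (b c key t : String) (ks : List String) (branches : List String)
    (hb : b ∈ branches)
    (acc : PySem.Dict (String × String) (PySem.Set String)) :
    (branches.foldl (fun acc branch =>
        if PySem.Str.isIn branch key then
          ks.foldl (fun acc course =>
            PySem.Dict.modify acc (branch, course) PySem.Set.empty (fun s => PySem.Set.add s t)) acc
        else acc) acc).getD (b, c) []
      = if PySem.Str.isIn b key = true ∧ c ∈ ks then PySem.Set.add (acc.getD (b, c) []) t
        else acc.getD (b, c) [] := by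
  induction branches generalizing acc with
  | nil => cases hb
  | cons β rest ih =>
    simp only [List.foldl_cons]
    have hstep : ∀ (a : PySem.Dict (String × String) (PySem.Set String)),
        ((if PySem.Str.isIn β key then
            ks.foldl (fun acc course =>
              PySem.Dict.modify acc (β, course) PySem.Set.empty (fun s => PySem.Set.add s t)) a
          else a)).getD (b, c) []
        = if β = b ∧ PySem.Str.isIn b key = true ∧ c ∈ ks then PySem.Set.add (a.getD (b, c) []) t
          else a.getD (b, c) [] := by
      intro a
      by_cases hβ : β = b
      · subst hβ
        by_cases hin : PySem.Str.isIn β key = true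
        · rw [if_pos hin, pv_keys_fold]
          simp only [hin, true_and]
        · have hcond : ¬(β = β ∧ PySem.Str.isIn β key = true ∧ c ∈ ks) := fun h => hin h.2.1
          rw [if_neg hin, if_neg hcond]
      · have hcond : ¬(β = b ∧ PySem.Str.isIn b key = true ∧ c ∈ ks) := fun h => hβ h.1
        have hcond2 : ¬(β = b ∧ c ∈ ks) := fun h => hβ h.1
        by_cases hin : PySem.Str.isIn β key = true
        · rw [if_pos hin, pv_keys_fold, if_neg hcond2, if_neg hcond]
        · rw [if_neg hin, if_neg hcond]
    by_cases hr : b ∈ rest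
    · rw [ih hr, hstep]
      by_cases hc : PySem.Str.isIn b key = true ∧ c ∈ ks
      · rw [if_pos hc]
        by_cases hβ : β = b
        · rw [if_pos (show β = b ∧ PySem.Str.isIn b key = true ∧ c ∈ ks from ⟨hβ, hc⟩), if_pos hc,
             pv_add_add_self]
        · have hcond : ¬(β = b ∧ PySem.Str.isIn b key = true ∧ c ∈ ks) := fun h => hβ h.1
          rw [if_neg hcond, if_pos hc]
      · have hcond : ¬(β = b ∧ PySem.Str.isIn b key = true ∧ c ∈ ks) := fun h => hc h.2
        rw [if_neg hc, if_neg hcond, if_neg hc]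
    · have hβ : β = b := by
        cases hb with
        | head => rfl
        | tail _ h => exact absurd h hr
      subst hβ
      rw [pv_branches_fold_notmem β c key t ks rest hr, hstep]
      by_cases hc : PySem.Str.isIn β key = true ∧ c ∈ ks
      · rw [if_pos (show β = β ∧ PySem.Str.isIn β key = true ∧ c ∈ ks from ⟨rfl, hc⟩), if_pos hc]
      · have hcond : ¬(β = β ∧ PySem.Str.isIn β key = true ∧ c ∈ ks) := fun h => hc h.2
        rw [if_neg hcond, if_neg hc]

-- projection of the values-loop of B at (b, c), for one allocated_teachers entry (key, values)
theorem pv_values_fold (b c key : String) (branches : List String) (hb : b ∈ branches)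
    (values : List (List (String × String)))
    (acc : PySem.Dict (String × String) (PySem.Set String)) :
    (values.foldl (fun acc v =>
        let vd := PySem.Dict.ofList v
        if vd.items = [] then acc else
        let teacher := vd.values.headD ""
        branches.foldl (fun acc branch =>
          if PySem.Str.isIn branch key then
            vd.keys.foldl (fun acc course =>
              PySem.Dict.modify acc (branch, course) PySem.Set.empty (fun s => PySem.Set.add s teacher)) acc
          else acc) acc) acc).getD (b, c) []
      = if PySem.Str.isIn b key = true then
          values.foldl (fun s v =>
            let vd := PySem.Dict.ofList v
            if vd.contains c then PySem.Set.add s (vd.values.headD "") else s) (acc.getD (b, c) [])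
        else acc.getD (b, c) [] := by
  induction values generalizing acc with
  | nil => simp
  | cons v rest ih =>
    simp only [List.foldl_cons, ih]
    have hstep : ((if (PySem.Dict.ofList v).items = [] then acc else
          branches.foldl (fun acc branch =>
            if PySem.Str.isIn branch key then
              (PySem.Dict.ofList v).keys.foldl (fun acc course =>
                PySem.Dict.modify acc (branch, course) PySem.Set.empty
                  (fun s => PySem.Set.add s ((PySem.Dict.ofList v).values.headD ""))) acc
            else acc) acc)).getD (b, c) []
        = if PySem.Str.isIn b key = true then
            (if (PySem.Dict.ofList v).contains c then
              PySem.Set.add (acc.getD (b, c) []) ((PySem.Dict.ofList v).values.headD "")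
             else acc.getD (b, c) [])
          else acc.getD (b, c) [] := by
      by_cases h0 : (PySem.Dict.ofList v).items = []
      · have hk : (PySem.Dict.ofList v).contains c = false := by
          rw [PySem.Dict.contains_eq_decide_mem_keys]
          simp [PySem.Dict.keys, h0]
        rw [if_pos h0]
        simp [hk]
      · rw [if_neg h0, pv_branches_fold b c key _ _ branches hb acc,
           PySem.Dict.contains_eq_decide_mem_keys]
        by_cases hin : PySem.Str.isIn b key = true
        · by_cases hc : c ∈ (PySem.Dict.ofList v).keys
          · rw [if_pos (show PySem.Str.isIn b key = true ∧ c ∈ (PySem.Dict.ofList v).keys from ⟨hin, hc⟩),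
               if_pos hin, if_pos (decide_eq_true hc)]
          · rw [if_neg (show ¬(PySem.Str.isIn b key = true ∧ c ∈ (PySem.Dict.ofList v).keys) from
                 fun h => hc h.2),
               if_pos hin, if_neg (show ¬(decide (c ∈ (PySem.Dict.ofList v).keys) = true) from
                 fun h => hc (of_decide_eq_true h))]
        · rw [if_neg (show ¬(PySem.Str.isIn b key = true ∧ c ∈ (PySem.Dict.ofList v).keys) from
             fun h => hin h.1),
             if_neg hin]
    rw [hstep]
    by_cases hin : PySem.Str.isIn b key = true
    · rw [if_pos hin, if_pos hin, if_pos hin]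
    · rw [if_neg hin, if_neg hin, if_neg hin]
-- projection of B's single pass over allocated_teachers at (b, c): it equals A's scan
theorem pv_items_fold (b c : String) (branches : List String) (hb : b ∈ branches)
    (L : List (String × List (List (String × String))))
    (acc : PySem.Dict (String × String) (PySem.Set String)) :
    (L.foldl (fun acc q =>
        q.2.foldl (fun acc v =>
          let vd := PySem.Dict.ofList v
          if vd.items = [] then acc else
          let teacher := vd.values.headD ""
          branches.foldl (fun acc branch =>
            if PySem.Str.isIn branch q.1 then
              vd.keys.foldl (fun acc course =>
                PySem.Dict.modify acc (branch, course) PySem.Set.empty (fun s => PySem.Set.add s teacher)) acc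
            else acc) acc) acc) acc).getD (b, c) []
      = L.foldl (fun s q =>
          if PySem.Str.isIn b q.1 then
            q.2.foldl (fun s v =>
              let vd := PySem.Dict.ofList v
              if vd.contains c then PySem.Set.add s (vd.values.headD "") else s) s
          else s) (acc.getD (b, c) []) := by
  induction L generalizing acc with
  | nil => rfl
  | cons q rest ih =>
    simp only [List.foldl_cons, ih, pv_values_fold b c q.1 branches hb q.2 acc]

-- the two ports agree
theorem pv_main (branch_course : List (String × List String))
    (allocated_teachers : List (String × List (List (String × String)))) :
    assign_teachers_to_branch_courses branch_course allocated_teachers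
      = assign_teachers_to_branch_courses_alt branch_course allocated_teachers := by
  unfold assign_teachers_to_branch_courses assign_teachers_to_branch_courses_alt
  refine congrArg PySem.Dict.items ?_
  beta_reduce
  apply PySem.List.foldl_congr_mem'
  intro p hp res
  have hb : p.1 ∈ (PySem.Dict.ofList branch_course).keys := PySem.Dict.mem_keys_of_mem_items _ hp
  congr 1
  apply PySem.List.foldl_congr_mem'
  intro course hc row
  rw [pv_items_fold p.1 course (PySem.Dict.ofList branch_course).keys hb
      (PySem.Dict.ofList allocated_teachers).items PySem.Dict.empty]
  simp [PySem.Dict.getD_empty, PySem.Set.empty]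

-- ===== VERDICT (by name: the statement is the Claim_ definition above) =====
theorem assign_teachers_to_branch_courses_spec : Claim_equal_assign_teachers_to_branch_courses := by
  intro branch_course allocated_teachers _
  exact pv_main branch_course allocated_teachers
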